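-- pv_equiv track=rewrite | github.com/jonathonreilly/toy-physics | scripts/frontier_s3_shellability.py | euler_characteristic
-- ===== SOURCE A (Python) =====
-- from itertools import combinations
--
-- def tet_faces(tet: tuple) -> list[tuple]:
--     """Return the 4 triangular faces of a tetrahedron."""
--     return [tuple(sorted(c)) for c in combinations(tet, 3)]
--
-- def euler_characteristic(tets: list[tuple]) -> int:
--     """Compute chi = V - E + F - T for a simplicial 3-complex."""
--     verts = set()
--     edges = set()
--     tris = set()
--     for tet in tets:
--         verts.update(tet)
--         for a, b in combinations(tet, 2):
--             edges.add((min(a, b), max(a, b)))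
--         for face in tet_faces(tet):
--             tris.add(face)
--     V, E, F, T = len(verts), len(edges), len(tris), len(tets)
--     return V - E + F - T
-- ===== SOURCE B (Python) =====
-- from itertools import combinations
--
-- def euler_characteristic(tets: list[tuple]) -> int:
--     """Compute chi = V - E + F - T for a simplicial 3-complex."""
--     chi = -len(tets)
--     sign = 1
--     for k in (1, 2, 3):
--         faces = sorted(tuple(sorted(c)) for tet in tets for c in combinations(tet, k))
--         distinct = 0
--         prev = None
--         for f in faces:
--             if f != prev:
--                 distinct += 1
--             prev = f
--         chi += sign * distinct
--         sign = -sign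
--     return chi
-- ===== Notes on version B (the rewrite author's own statement) =====
-- stated objective: alternative
-- what changed: Replaces A's three hash sets maintained in one pass by a sort-then-scan deduplication: for each dimension k in (1,2,3) it flattens all sorted k-combinations into one list, sorts it, and counts distinct elements by a linear scan over adjacent pairs, accumulating the alternating sum starting from -len(tets).
import Mathlib
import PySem

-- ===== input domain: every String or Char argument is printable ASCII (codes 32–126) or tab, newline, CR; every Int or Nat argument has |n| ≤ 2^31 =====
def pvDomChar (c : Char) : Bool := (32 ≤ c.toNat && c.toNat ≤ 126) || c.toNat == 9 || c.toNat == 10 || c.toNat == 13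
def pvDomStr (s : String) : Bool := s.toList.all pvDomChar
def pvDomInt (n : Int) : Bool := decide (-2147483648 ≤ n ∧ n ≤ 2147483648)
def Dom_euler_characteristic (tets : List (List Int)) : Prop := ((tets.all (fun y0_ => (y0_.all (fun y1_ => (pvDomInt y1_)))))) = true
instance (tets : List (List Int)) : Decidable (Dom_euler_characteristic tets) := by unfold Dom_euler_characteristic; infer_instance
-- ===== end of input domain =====

-- B replaces A's three hash sets maintained in one pass by sort-then-scan deduplication:
-- per dimension k ∈ (1,2,3) it sorts the flattened list of sorted k-combinations and counts
-- distinct elements by one linear scan over adjacent pairs; objective: alternative algorithm.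
-- Python tuples of ints (edges, faces) are encoded as List Int in both ports.

-- ===== PORT A =====
-- tet_faces(tet): [tuple(sorted(c)) for c in combinations(tet, 3)]
def tet_faces (tet : List Int) : List (List Int) :=
  (PySem.List.combinations tet 3).map (fun c => PySem.List.sorted c (fun x => x))

def euler_characteristic (tets : List (List Int)) : Int :=
  let st := tets.foldl
    (fun (st : PySem.Set Int × PySem.Set (List Int) × PySem.Set (List Int)) tet =>
      (PySem.Set.update st.1 tet,                      -- verts.update(tet)
       (PySem.List.combinations tet 2).foldl          -- for a, b in combinations(tet, 2)
         (fun e c => match c with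
           | [a, b] => PySem.Set.add e [min a b, max a b]   -- edges.add((min(a,b), max(a,b)))
           | _ => e) st.2.1,
       (tet_faces tet).foldl (fun t f => PySem.Set.add t f) st.2.2))  -- tris.add(face)
    (PySem.Set.empty, PySem.Set.empty, PySem.Set.empty)
  (st.1.length : Int) - st.2.1.length + st.2.2.length - tets.length

-- ===== PORT B =====
def euler_characteristic_alt (tets : List (List Int)) : Int :=
  let st := ([1, 2, 3] : List Nat).foldl          -- for k in (1, 2, 3): state (chi, sign)
    (fun (st : Int × Int) k =>
      -- faces = sorted(tuple(sorted(c)) for tet in tets for c in combinations(tet, k))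
      let faces := PySem.List.sorted
        (tets.flatMap (fun tet =>
          (PySem.List.combinations tet k).map (fun c => PySem.List.sorted c (fun x => x))))
        (fun x => x)
      -- linear scan counting distinct adjacent runs; state (distinct, prev)
      let distinct := (faces.foldl
        (fun (dp : Int × Option (List Int)) f =>
          (if some f ≠ dp.2 then dp.1 + 1 else dp.1, some f))
        (0, none)).1
      (st.1 + st.2 * distinct, -st.2))
    (-(tets.length : Int), 1)
  st.1

-- ===== PRECONDITION & SPEC =====
def Spec_euler_characteristic (tets : List (List Int)) (out : Int) : Prop := out = euler_characteristic_alt tets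
instance (tets : List (List Int)) (out : Int) : Decidable (Spec_euler_characteristic tets out) := by unfold Spec_euler_characteristic; infer_instance

-- ===== CLAIM (what is proved, stated in full; the proofs are below) =====
def Claim_equal_euler_characteristic : Prop := ∀ (tets : List (List Int)), Dom_euler_characteristic tets → Spec_euler_characteristic tets (euler_characteristic tets)

-- ===== LEMMAS AND PROOFS =====

-- a fold of per-tet updates is one update by the concatenation
theorem foldl_update_flatMap {α β : Type} [BEq α] (h : β → List α) :
    ∀ (l : List β) (s : PySem.Set α),
      l.foldl (fun s x => PySem.Set.update s (h x)) s = PySem.Set.update s (l.flatMap h) := by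
  intro l
  induction l with
  | nil => intro s; simp [PySem.Set.update]
  | cons x xs ih => intro s; simp [List.foldl, PySem.Set.update_append, ih]

theorem sorted_singleton (x : Int) : PySem.List.sorted [x] (fun y => y) = [x] :=
  PySem.List.sorted_id_eq_of_perm_of_pairwise [x] [x] (List.Perm.refl _) (by simp)

theorem sorted_pair (a b : Int) :
    PySem.List.sorted [a, b] (fun y => y) = [min a b, max a b] := by
  refine PySem.List.sorted_id_eq_of_perm_of_pairwise _ _ ?_ (by simp [List.pairwise_cons])
  rcases le_total a b with h | h
  · simp [min_eq_left h, max_eq_right h]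
  · rw [min_eq_right h, max_eq_left h]
    exact List.Perm.swap a b []

-- deduplicated cardinality is preserved by an injective map
theorem len_ofList_map_inj {α β : Type} [BEq α] [LawfulBEq α] [BEq β] [LawfulBEq β]
    (f : α → β) (hf : Function.Injective f) (l : List α) :
    (PySem.Set.ofList (l.map f)).length = (PySem.Set.ofList l).length := by
  induction l using List.reverseRecOn with
  | nil => rfl
  | append_singleton xs x ih =>
      rw [List.map_append, List.map_singleton, PySem.Set.ofList_append_singleton,
        PySem.Set.ofList_append_singleton, PySem.Set.add_eq_ite, PySem.Set.add_eq_ite]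
      have hmem : f x ∈ PySem.Set.ofList (xs.map f) ↔ x ∈ PySem.Set.ofList xs := by
        simp only [PySem.Set.mem_ofList, List.mem_map]
        constructor
        · rintro ⟨y, hy, hxy⟩; exact (hf hxy) ▸ hy
        · intro hx; exact ⟨x, hx, rfl⟩
      by_cases hx : x ∈ PySem.Set.ofList xs
      · rw [if_pos (hmem.mpr hx), if_pos hx, ih]
      · rw [if_neg (fun h => hx (hmem.mp h)), if_neg hx]
        simp [ih]

-- deduplicated cardinality depends only on the multiset of elements
theorem len_ofList_perm {α : Type} [DecidableEq α] [BEq α] [LawfulBEq α]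
    {xs ys : List α} (h : xs.Perm ys) :
    (PySem.Set.ofList xs).length = (PySem.Set.ofList ys).length := by
  have card_eq : ∀ (l : List α), (PySem.Set.ofList l).length = l.toFinset.card := by
    intro l
    have hnd : (PySem.Set.ofList l).Nodup := PySem.Set.nodup_ofList l
    have : (PySem.Set.ofList l).toFinset = l.toFinset := by
      ext a; simp [List.mem_toFinset, PySem.Set.mem_ofList]
    rw [← this, List.toFinset_card_of_nodup hnd]
  rw [card_eq, card_eq]
  congr 1
  ext a; simp [h.mem_iff]

-- in a ≤-sorted list every element is ≤ the last one
theorem le_getLast?_of_pairwise {α : Type} [LinearOrder α] :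
    ∀ (l : List α), l.Pairwise (· ≤ ·) → ∀ a ∈ l, ∀ b, l.getLast? = some b → a ≤ b := by
  intro l
  induction l using List.reverseRecOn with
  | nil => intro _ a ha; simp at ha
  | append_singleton xs x _ =>
      intro h a ha b hb
      rw [List.getLast?_concat] at hb
      cases hb
      rcases List.mem_append.mp ha with ha | ha
      · exact ((List.pairwise_append.mp h).2.2 a ha x (by simp))
      · simp at ha; exact le_of_eq ha

-- the adjacent-runs scan over a ≤-sorted list computes the deduplicated cardinality
theorem scan_runs :
    ∀ (l : List (List Int)), l.Pairwise (· ≤ ·) →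
      l.foldl (fun (dp : Int × Option (List Int)) f =>
          (if some f ≠ dp.2 then dp.1 + 1 else dp.1, some f)) (0, none)
        = (((PySem.Set.ofList l).length : Int), l.getLast?) := by
  intro l
  induction l using List.reverseRecOn with
  | nil => intro _; rfl
  | append_singleton xs x ih =>
      intro h
      have hxs : xs.Pairwise (· ≤ ·) := (List.pairwise_append.mp h).1
      have hall : ∀ a ∈ xs, a ≤ x := fun a ha =>
        (List.pairwise_append.mp h).2.2 a ha x (by simp)
      rw [List.foldl_append, ih hxs]
      simp only [List.foldl]
      have hmem : x ∈ PySem.Set.ofList xs ↔ xs.getLast? = some x := by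
        rw [PySem.Set.mem_ofList]
        constructor
        · intro hx
          have hne : xs ≠ [] := List.ne_nil_of_mem hx
          set b := xs.getLast hne with hbdef
          have hb : xs.getLast? = some b := List.getLast?_eq_some_getLast hne
          have hbmem : b ∈ xs := List.mem_of_getLast? hb
          have h1 : x ≤ b := le_getLast?_of_pairwise xs hxs x hx b hb
          have h2 : b ≤ x := hall b hbmem
          rw [hb, le_antisymm h1 h2]
        · intro hx; exact List.mem_of_getLast? hx
      rw [PySem.Set.ofList_append_singleton, PySem.Set.add_eq_ite, List.getLast?_concat]
      by_cases hx : x ∈ PySem.Set.ofList xs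
      · rw [if_pos hx, if_neg (by simp [hmem.mp hx])]
      · rw [if_neg hx, if_pos]
        · simp
        · intro hcon
          exact hx (hmem.mpr (by simpa using hcon.symm))

-- B's per-dimension sort-then-scan count equals the deduplicated cardinality of the raw list
theorem count_sorted (raw : List (List Int)) :
    ((PySem.List.sorted raw (fun x => x)).foldl
        (fun (dp : Int × Option (List Int)) f =>
          (if some f ≠ dp.2 then dp.1 + 1 else dp.1, some f)) (0, none)).1
      = ((PySem.Set.ofList raw).length : Int) := by
  have hs : PySem.List.sorted raw (fun x : List Int => x)
      = @PySem.List.sorted (List Int) (List Int) _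
          (@LinearOrder.toDecidableLT _ List.instLinearOrder) raw (fun x => x) false := by
    congr 1
  have hp : (PySem.List.sorted raw (fun x : List Int => x)).Pairwise (· ≤ ·) := by
    rw [hs]; exact PySem.List.sorted_pairwise raw (fun x => x)
  rw [scan_runs _ hp]
  exact congrArg _ (len_ofList_perm (PySem.List.sorted_perm raw (fun x => x) false))

-- the inner edge loop of A adds exactly the sorted 2-combinations
theorem edges_inner (tet : List Int) (s : PySem.Set (List Int)) :
    (PySem.List.combinations tet 2).foldl
      (fun e c => match c with
        | [a, b] => PySem.Set.add e [min a b, max a b]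
        | _ => e) s
      = PySem.Set.update s ((PySem.List.combinations tet 2).map
          (fun c => PySem.List.sorted c (fun x => x))) := by
  rw [PySem.Set.update_map_eq_foldl_add]
  apply PySem.List.foldl_congr_mem
  intro acc c hc
  have hlen := PySem.List.length_of_mem_combinations hc
  match c, hlen with
  | [a, b], _ => simp [sorted_pair]

theorem verts_len (tets : List (List Int)) :
    (tets.foldl (fun s tet => PySem.Set.update s tet) (PySem.Set.empty : PySem.Set Int)).length
      = (PySem.Set.ofList (tets.flatMap (fun tet =>
          (PySem.List.combinations tet 1).map (fun c => PySem.List.sorted c (fun x => x))))).length := by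
  have h1 : tets.foldl (fun s tet => PySem.Set.update s tet) (PySem.Set.empty : PySem.Set Int)
      = PySem.Set.ofList (tets.flatMap (fun tet => tet)) := by
    have := foldl_update_flatMap (fun tet : List Int => tet) tets PySem.Set.empty
    simpa [PySem.Set.empty, PySem.Set.update_nil_left] using this
  have hfun : (fun tet : List Int => (PySem.List.combinations tet 1).map
      (fun c => PySem.List.sorted c (fun x => x))) = (fun tet => tet.map (fun x => [x])) :=
    funext fun tet => by
      simp [PySem.List.combinations_one, List.map_map, Function.comp, sorted_singleton]
  have h2 : tets.flatMap (fun tet =>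
      (PySem.List.combinations tet 1).map (fun c => PySem.List.sorted c (fun x => x)))
      = (tets.flatMap (fun tet => tet)).map (fun x => [x]) := by
    rw [hfun, ← List.map_flatMap]
  rw [h1, h2, len_ofList_map_inj (fun x : Int => [x]) (fun a b h => by simpa using h)]

-- split A's single pass with triple state into three independent folds
theorem foldl_triple {β σ1 σ2 σ3 : Type} (f1 : σ1 → β → σ1) (f2 : σ2 → β → σ2) (f3 : σ3 → β → σ3) :
    ∀ (l : List β) (a : σ1) (b : σ2) (c : σ3),
      l.foldl (fun st x => (f1 st.1 x, f2 st.2.1 x, f3 st.2.2 x)) (a, b, c)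
        = (l.foldl f1 a, l.foldl f2 b, l.foldl f3 c) := by
  intro l
  induction l with
  | nil => intro a b c; rfl
  | cons x xs ih => intro a b c; simp only [List.foldl]; exact ih _ _ _

-- ===== VERDICT (by name: the statement is the Claim_ definition above) =====
theorem euler_characteristic_spec : Claim_equal_euler_characteristic := by
  intro tets _
  show euler_characteristic tets = euler_characteristic_alt tets
  simp only [euler_characteristic, euler_characteristic_alt, List.foldl]
  rw [count_sorted, count_sorted, count_sorted]
  rw [show List.foldl
        (fun (st : PySem.Set Int × PySem.Set (List Int) × PySem.Set (List Int)) (tet : List Int) =>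
          (PySem.Set.update st.1 tet,
           List.foldl (fun e c => match c with
             | [a, b] => PySem.Set.add e [min a b, max a b]
             | _ => e) st.2.1 (PySem.List.combinations tet 2),
           List.foldl (fun t f => PySem.Set.add t f) st.2.2 (tet_faces tet)))
        (PySem.Set.empty, PySem.Set.empty, PySem.Set.empty) tets
      = (List.foldl (fun (s : PySem.Set Int) (tet : List Int) => PySem.Set.update s tet) PySem.Set.empty tets,
         List.foldl (fun (s : PySem.Set (List Int)) (tet : List Int) =>
           List.foldl (fun e c => match c with
             | [a, b] => PySem.Set.add e [min a b, max a b]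
             | _ => e) s (PySem.List.combinations tet 2)) PySem.Set.empty tets,
         List.foldl (fun (s : PySem.Set (List Int)) (tet : List Int) =>
           List.foldl (fun t f => PySem.Set.add t f) s (tet_faces tet)) PySem.Set.empty tets)
      from foldl_triple
        (fun (s : PySem.Set Int) (tet : List Int) => PySem.Set.update s tet)
        (fun (s : PySem.Set (List Int)) (tet : List Int) =>
          List.foldl (fun e c => match c with
            | [a, b] => PySem.Set.add e [min a b, max a b]
            | _ => e) s (PySem.List.combinations tet 2))
        (fun (s : PySem.Set (List Int)) (tet : List Int) =>
          List.foldl (fun t f => PySem.Set.add t f) s (tet_faces tet))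
        tets PySem.Set.empty PySem.Set.empty PySem.Set.empty]
  dsimp only
  rw [verts_len]
  rw [show (fun (s : PySem.Set (List Int)) (tet : List Int) =>
        (PySem.List.combinations tet 2).foldl
          (fun e c => match c with
            | [a, b] => PySem.Set.add e [min a b, max a b]
            | _ => e) s)
      = (fun (s : PySem.Set (List Int)) (tet : List Int) =>
          PySem.Set.update s ((PySem.List.combinations tet 2).map
            (fun c => PySem.List.sorted c (fun x => x))))
      from funext fun s => funext fun tet => edges_inner tet s]
  rw [foldl_update_flatMap]
  rw [show (fun (s : PySem.Set (List Int)) (tet : List Int) =>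
        (tet_faces tet).foldl (fun t f => PySem.Set.add t f) s)
      = (fun (s : PySem.Set (List Int)) (tet : List Int) => PySem.Set.update s (tet_faces tet))
      from funext fun s => funext fun tet => by
        rw [← List.map_id (tet_faces tet), PySem.Set.update_map_eq_foldl_add]; simp]
  rw [foldl_update_flatMap]
  simp only [PySem.Set.empty, PySem.Set.update_nil_left]
  rw [show List.flatMap tet_faces tets
      = List.flatMap (fun tet => (PySem.List.combinations tet 3).map
          (fun c => PySem.List.sorted c (fun x => x))) tets from rfl]
  ring
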